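-- pv_equiv track=rewrite | github.com/deepforestsci/DeepRetro | src/deprotecting_group.py | validate_masked_smiles
-- ===== SOURCE A (Python) =====
-- DEPROTECT_MAP = {
--     "$": "OC",  # OMe
--     "%": "COCc1ccccc1",  # OBn
--     "&": "COC",  # OEt
-- }
--
-- def validate_masked_smiles(smiles: str) -> bool:
--     """
--     Validate if a SMILES string contains valid masking symbols.
--
--     Parameters
--     ----------
--     smiles : str
--         Input SMILES string to validate
--
--     Returns
--     -------
--     bool
--         True if the SMILES contains valid masking symbols ('$', '%', '&')
--         and other valid SMILES characters, False otherwise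
--     """
--     if not smiles:
--         return True
--
--     # Check if the SMILES contains any of our masking symbols
--     has_masking_symbols = any(symbol in smiles
--                               for symbol in DEPROTECT_MAP.keys())
--
--     if not has_masking_symbols:
--         return False
--
--     # Define valid characters for masked SMILES (including our symbols)
--     valid_chars = set("$%&") | set(
--         "ABCDEFGHIJKLMNOPQRSTUVWXYZabcdefghijklmnopqrstuvwxyz0123456789()[]{}@+-=#$%&*./\\"
--     )
--
--     # Check if all characters in the SMILES are valid
--     return all(char in valid_chars for char in smiles)
-- ===== SOURCE B (Python) =====
-- DEPROTECT_MAP = {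
--     "$": "OC",  # OMe
--     "%": "COCc1ccccc1",  # OBn
--     "&": "COC",  # OEt
-- }
--
-- _OTHER_VALID = "ABCDEFGHIJKLMNOPQRSTUVWXYZabcdefghijklmnopqrstuvwxyz0123456789()[]{}@+-=#*./\\"
--
-- def validate_masked_smiles(smiles: str) -> bool:
--     if not smiles:
--         return True
--     # Single pass with an accumulator flag: classify each character once,
--     # bail out immediately on an invalid one, remember whether a mask was seen.
--     has_mask = False
--     for ch in smiles:
--         if ch in "$%&":
--             has_mask = True
--         elif ch not in _OTHER_VALID:
--             return False
--     return has_mask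
-- ===== Notes on version B (the rewrite author's own statement) =====
-- stated objective: alternative
-- what changed: Replaces A's two staged comprehension scans (any() over substring searches, then all() over a validity set) with one fused pass that classifies each character once, early-returns False on the first invalid character and carries a has_mask accumulator flag to the end.
import Mathlib
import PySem

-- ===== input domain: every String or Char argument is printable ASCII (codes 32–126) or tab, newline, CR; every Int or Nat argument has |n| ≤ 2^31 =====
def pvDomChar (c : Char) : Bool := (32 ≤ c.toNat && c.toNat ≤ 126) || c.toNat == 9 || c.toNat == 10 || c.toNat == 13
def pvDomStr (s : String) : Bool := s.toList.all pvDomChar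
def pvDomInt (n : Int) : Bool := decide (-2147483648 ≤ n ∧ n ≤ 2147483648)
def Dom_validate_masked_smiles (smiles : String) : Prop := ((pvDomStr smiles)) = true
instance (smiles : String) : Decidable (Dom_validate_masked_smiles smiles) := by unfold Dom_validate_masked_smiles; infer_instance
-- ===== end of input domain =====

-- B fuses A's two staged scans (any() over substring searches, then all() over a validity
-- set) into one pass with an early exit and a has_mask accumulator flag (alternative, same cost).

-- ===== PORT A =====

-- valid_chars = set("$%&") | set("ABC…\\"): the literal A builds
def pvValidChars : PySem.Set Char :=
  PySem.Set.union (PySem.Set.ofList "$%&".toList)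
    "ABCDEFGHIJKLMNOPQRSTUVWXYZabcdefghijklmnopqrstuvwxyz0123456789()[]{}@+-=#$%&*./\\".toList

def validate_masked_smiles (smiles : String) : Bool :=
  if smiles.toList = [] then true
  else
    let has_masking_symbols := ["$", "%", "&"].any (fun symbol => PySem.Str.isIn symbol smiles)
    if !has_masking_symbols then false
    else
      smiles.toList.all (fun ch => PySem.Set.contains pvValidChars ch)

-- ===== PORT B =====

-- _OTHER_VALID from Source B
def pvOtherValid : List Char :=
  "ABCDEFGHIJKLMNOPQRSTUVWXYZabcdefghijklmnopqrstuvwxyz0123456789()[]{}@+-=#*./\\".toList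

-- Source B's for-loop: one character at a time; `ch in "$%&"` / `ch not in _OTHER_VALID` are
-- single-character substring tests, exactly list membership of the character.
def pvBLoop : List Char → Bool → Bool
  | [], has_mask => has_mask
  | ch :: rest, has_mask =>
    if ("$%&".toList).contains ch then pvBLoop rest true
    else if !(pvOtherValid.contains ch) then false
    else pvBLoop rest has_mask

def validate_masked_smiles_alt (smiles : String) : Bool :=
  if smiles.toList = [] then true
  else pvBLoop smiles.toList false

-- ===== PRECONDITION & SPEC =====
def Spec_validate_masked_smiles (smiles : String) (out : Bool) : Prop := out = validate_masked_smiles_alt smiles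
instance (smiles : String) (out : Bool) : Decidable (Spec_validate_masked_smiles smiles out) := by unfold Spec_validate_masked_smiles; infer_instance

-- ===== CLAIM (what is proved, stated in full; the proofs are below) =====
def Claim_equal_validate_masked_smiles : Prop := ∀ (smiles : String), Dom_validate_masked_smiles smiles → Spec_validate_masked_smiles smiles (validate_masked_smiles smiles)

-- ===== LEMMAS AND PROOFS =====

-- B's loop computes "all chars valid AND (flag OR some mask char present)"
lemma pvBLoop_eq (l : List Char) (hm : Bool) :
    pvBLoop l hm
      = ((l.all (fun c => ("$%&".toList).contains c || pvOtherValid.contains c))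
          && (hm || l.any (fun c => ("$%&".toList).contains c))) := by
  induction l generalizing hm with
  | nil => simp [pvBLoop]
  | cons c rest ih =>
    simp only [pvBLoop, List.all_cons, List.any_cons]
    cases h1 : ("$%&".toList).contains c with
    | true =>
      rw [if_pos rfl, ih, Bool.true_or, Bool.true_or, Bool.or_true, Bool.and_true, Bool.true_and, Bool.and_true]
    | false =>
      rw [if_neg (by simp), Bool.false_or, Bool.false_or]
      cases h2 : pvOtherValid.contains c with
      | true =>
        rw [Bool.not_true, if_neg (by simp), ih, Bool.true_and]
      | false =>
        rw [Bool.not_false, if_pos rfl, Bool.false_and, Bool.false_and]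

-- A's `symbol in smiles` over the three 1-char symbols = a per-character mask scan
lemma has_masking_eq (s : String) :
    (["$", "%", "&"].any (fun symbol => PySem.Str.isIn symbol s))
      = s.toList.any (fun c => ("$%&".toList).contains c) := by
  rw [Bool.eq_iff_iff, List.any_eq_true, List.any_eq_true]
  constructor
  · rintro ⟨sym, hsym, hin⟩
    rw [PySem.Str.isIn_iff_infix] at hin
    simp only [List.mem_cons, List.not_mem_nil, or_false] at hsym
    have hc : ∃ c, sym.toList = [c] ∧ ("$%&".toList).contains c = true := by
      rcases hsym with h | h | h <;> subst h <;> exact ⟨_, rfl, by decide⟩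
    obtain ⟨c, hce, hcs⟩ := hc
    rw [hce, List.singleton_infix_iff] at hin
    exact ⟨c, hin, hcs⟩
  · rintro ⟨c, hmem, hc⟩
    refine ⟨String.ofList [c], ?_, ?_⟩
    · have he : ("$%&".toList) = ['$', '%', '&'] := rfl
      rw [he, List.contains_iff_mem, List.mem_cons, List.mem_cons, List.mem_singleton] at hc
      rcases hc with h | h | h <;> subst h <;> decide
    · rw [PySem.Str.isIn_iff_infix]
      simpa using (List.singleton_infix_iff c s.toList).mpr hmem

-- A's big character list is, as a set, the masks plus B's _OTHER_VALID list
lemma valid_point (c : Char) :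
    PySem.Set.contains pvValidChars c
      = (("$%&".toList).contains c || pvOtherValid.contains c) := by
  rw [Bool.eq_iff_iff, PySem.Set.contains_iff, pvValidChars, PySem.Set.mem_union,
      PySem.Set.mem_ofList, Bool.or_eq_true]
  have hperm :
      ("ABCDEFGHIJKLMNOPQRSTUVWXYZabcdefghijklmnopqrstuvwxyz0123456789()[]{}@+-=#$%&*./\\".toList).Perm
        ("$%&".toList ++ pvOtherValid) := by decide
  rw [hperm.mem_iff, List.mem_append]
  simp

-- ===== VERDICT (by name: the statement is the Claim_ definition above) =====
theorem validate_masked_smiles_spec : Claim_equal_validate_masked_smiles := by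
  intro s _
  unfold Spec_validate_masked_smiles validate_masked_smiles validate_masked_smiles_alt
  by_cases h : s.toList = []
  · simp [h]
  · simp only [h, ite_false]
    rw [pvBLoop_eq, has_masking_eq]
    simp only [valid_point, Bool.false_or]
    cases hb : s.toList.any (fun c => ("$%&".toList).contains c) with
    | true => rw [Bool.not_true, if_neg (by simp), Bool.and_true]
    | false => rw [Bool.not_false, if_pos rfl, Bool.and_false]
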